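-- pv_equiv track=rewrite | github.com/River-Mt/Algorithm | 프로그래머스/unrated/181890. 왼쪽 오른쪽/왼쪽 오른쪽.py | solution
-- ===== SOURCE A (Python) =====
-- def solution(str_list):
--     answer = []
--
--     for i in range(len(str_list)):
--         ch = str_list[i]
--         if ch == 'l':
--             answer = str_list[:i]
--             break
--         elif ch == 'r':
--             answer = str_list[i+1:]
--             break
--
--     return answer
-- ===== SOURCE B (Python) =====
-- def solution(str_list):
--     n = len(str_list)
--     li = str_list.index('l') if 'l' in str_list else n
--     ri = str_list.index('r') if 'r' in str_list else n
--     if li == n and ri == n: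
--         return []
--     if li < ri:
--         return str_list[:li]
--     return str_list[ri + 1:]
-- ===== Notes on version B (the rewrite author's own statement) =====
-- stated objective: idiomatic
-- what changed: Replaces the single indexed break-on-first scan with two guarded first-occurrence lookups (index of 'l' and of 'r', sentinel = len) followed by a comparison deciding which slice to return.
import Mathlib
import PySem

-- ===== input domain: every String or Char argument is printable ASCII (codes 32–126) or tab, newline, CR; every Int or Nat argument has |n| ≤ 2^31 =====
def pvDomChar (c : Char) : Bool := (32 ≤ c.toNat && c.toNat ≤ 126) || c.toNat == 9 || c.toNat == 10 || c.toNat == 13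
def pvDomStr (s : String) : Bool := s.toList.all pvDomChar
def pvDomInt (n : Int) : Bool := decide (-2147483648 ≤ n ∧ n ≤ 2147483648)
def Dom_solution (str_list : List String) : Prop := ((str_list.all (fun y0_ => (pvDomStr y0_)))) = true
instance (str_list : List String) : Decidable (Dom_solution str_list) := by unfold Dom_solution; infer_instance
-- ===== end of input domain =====

-- B replaces A's single break-on-first indexed scan by two guarded first-occurrence
-- lookups (index of 'l' and of 'r', sentinel = len) and a comparison; idiomatic, same cost.

-- ===== PORT A =====
-- the 'for i in range(len(str_list))' loop with break, as recursion on the index i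
def solutionLoop (str_list : List String) (i : Nat) : List String :=
  if h : i < str_list.length then
    let ch := str_list[i]
    if ch = "l" then str_list.take i            -- str_list[:i], 0 ≤ i ≤ len: exact
    else if ch = "r" then str_list.drop (i + 1) -- str_list[i+1:], in range: exact
    else solutionLoop str_list (i + 1)
  else []                                        -- loop ends: answer still []
termination_by str_list.length - i

def solution (str_list : List String) : List String := solutionLoop str_list 0

-- ===== PORT B =====
def solution_alt (str_list : List String) : List String :=
  let n := str_list.length
  let li := (PySem.List.index? str_list "l").getD n
  let ri := (PySem.List.index? str_list "r").getD n
  if li = n ∧ ri = n then []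
  else if li < ri then str_list.take li          -- str_list[:li]
  else str_list.drop (ri + 1)                    -- str_list[ri+1:]

-- ===== PRECONDITION & SPEC =====
def Spec_solution (str_list : List String) (out : List String) : Prop := out = solution_alt str_list
instance (str_list : List String) (out : List String) : Decidable (Spec_solution str_list out) := by unfold Spec_solution; infer_instance

-- ===== CLAIM (what is proved, stated in full; the proofs are below) =====
def Claim_equal_solution : Prop := ∀ (str_list : List String), Dom_solution str_list → Spec_solution str_list (solution str_list)

-- ===== LEMMAS AND PROOFS =====

-- first occurrence of v in xs is exactly i when v misses the prefix and sits at i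
theorem index?_eq_of_take {xs : List String} {v : String} {i : Nat}
    (hi : i < xs.length) (hv : xs[i] = v) (hpre : v ∉ xs.take i) :
    PySem.List.index? xs v = some i := by
  rw [PySem.List.index?_eq_some_iff]
  refine ⟨xs.take i, xs.drop (i + 1), ?_, by simp [List.length_take, Nat.min_eq_left hi.le], hpre⟩
  conv_lhs => rw [← List.take_append_drop i xs]
  rw [← List.getElem_cons_drop hi, hv]

-- if v misses the first i+1 elements, its (sentinel'd) first index exceeds i
theorem index?_getD_gt {xs : List String} {v : String} {i : Nat}
    (hi : i < xs.length) (hpre : v ∉ xs.take (i + 1)) :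
    i < (PySem.List.index? xs v).getD xs.length := by
  cases h : PySem.List.index? xs v with
  | none => simpa using hi
  | some k =>
    obtain ⟨hk, hkv, -⟩ := PySem.List.getElem_of_index?_eq_some h
    simp only [Option.getD_some]
    by_contra hle
    exact hpre (by
      have hk' : k < (xs.take (i + 1)).length := by
        simp [List.length_take]; omega
      have : (xs.take (i + 1))[k] = v := by
        simpa [List.getElem_take] using hkv
      exact this ▸ List.getElem_mem hk')

-- extend a 'not in the first i elements' fact by one element
theorem not_mem_take_succ {xs : List String} {v : String} {i : Nat}
    (h : i < xs.length) (hpre : v ∉ xs.take i) (hne : v ≠ xs[i]) :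
    v ∉ xs.take (i + 1) := by
  intro hm
  rw [List.take_succ_eq_append_getElem h] at hm
  rcases List.mem_append.1 hm with h1 | h1
  · exact hpre h1
  · exact hne (List.mem_singleton.1 h1)

-- the loop starting at i, with no 'l'/'r' seen so far, computes B's value
theorem solutionLoop_eq (xs : List String) (i : Nat) (hi : i ≤ xs.length)
    (hl : "l" ∉ xs.take i) (hr : "r" ∉ xs.take i) :
    solutionLoop xs i = solution_alt xs := by
  unfold solutionLoop
  by_cases h : i < xs.length
  · simp only [dif_pos h]
    by_cases hL : xs[i] = "l"
    · have hidx : PySem.List.index? xs "l" = some i := index?_eq_of_take h hL hl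
      have hrgt : i < (PySem.List.index? xs "r").getD xs.length :=
        index?_getD_gt h (not_mem_take_succ h hr (by rw [hL]; decide))
      simp only [if_pos hL, solution_alt, hidx, Option.getD_some]
      have h1 : ¬ (i = xs.length ∧ (PySem.List.index? xs "r").getD xs.length = xs.length) := by
        intro ⟨he, _⟩; omega
      rw [if_neg h1, if_pos hrgt]
    · by_cases hR : xs[i] = "r"
      · have hidx : PySem.List.index? xs "r" = some i := index?_eq_of_take h hR hr
        have hlgt : i < (PySem.List.index? xs "l").getD xs.length :=
          index?_getD_gt h (not_mem_take_succ h hl (by rw [hR]; decide))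
        simp only [if_neg hL, if_pos hR, solution_alt, hidx, Option.getD_some]
        have h1 : ¬ ((PySem.List.index? xs "l").getD xs.length = xs.length ∧ i = xs.length) := by
          intro ⟨_, he⟩; omega
        rw [if_neg h1, if_neg (by omega)]
      · rw [if_neg hL, if_neg hR]
        refine solutionLoop_eq xs (i + 1) h (not_mem_take_succ h hl ?_) (not_mem_take_succ h hr ?_)
        · exact fun e => hL e.symm
        · exact fun e => hR e.symm
  · have hlen : i = xs.length := by omega
    have hxl : "l" ∉ xs := by rwa [hlen, List.take_length] at hl
    have hxr : "r" ∉ xs := by rwa [hlen, List.take_length] at hr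
    have hnl : PySem.List.index? xs "l" = none := (PySem.List.index?_eq_none_iff xs "l").mpr hxl
    have hnr : PySem.List.index? xs "r" = none := (PySem.List.index?_eq_none_iff xs "r").mpr hxr
    rw [dif_neg h]
    simp only [solution_alt, hnl, hnr, Option.getD_none]
    simp
termination_by xs.length - i

-- ===== VERDICT (by name: the statement is the Claim_ definition above) =====
theorem solution_spec : Claim_equal_solution := by
  intro xs _
  show solution xs = solution_alt xs
  exact solutionLoop_eq xs 0 (Nat.zero_le _) (by simp) (by simp)
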